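-- pv_equiv track=rewrite | github.com/Hagdos/Adventofcode | 2018/Day 8/Day 8.py | valueMeta
-- ===== SOURCE A (Python) =====
-- def valueMeta(tree, index):
--     value = 0
--     nodes = [0] * tree[index]
--     datas = tree[index+1]
--     index += 2
--
--     for node in range(len(nodes)):
--         index, nodes[node] = valueMeta(tree, index)
--
--     if not nodes:
--         for data in range(datas):
--             value += tree[index]
--             index += 1
--
--     else:
--         for data in range(datas):
--             if tree[index] <= len(nodes):
--                 value += nodes[tree[index]-1]
--             index += 1
--
--     return index, value
-- ===== SOURCE B (Python) =====
-- def valueMeta(tree, index):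
--     index, root = _parse(tree, index)
--     return index, _value(root)
--
-- def _parse(tree, i):
--     nchild, nmeta = tree[i], tree[i + 1]
--     i += 2
--     children = []
--     for _ in range(nchild):
--         i, c = _parse(tree, i)
--         children.append(c)
--     metas = []
--     for _ in range(nmeta):
--         metas.append(tree[i])
--         i += 1
--     return i, (children, metas)
--
-- def _value(node):
--     children, metas = node
--     if not children:
--         return sum(metas)
--     vals = [_value(c) for c in children]
--     return sum(vals[m - 1] for m in metas if m <= len(vals))
-- ===== Notes on version B (the rewrite author's own statement) =====
-- stated objective: alternative
-- what changed: A interleaves cursor advancement and value computation in one recursion over the flat array; B first parses the array into an explicit rose tree (children + metadata per node) and then evaluates that tree in a separate structural pass, keeping the same metadata guard m <= len(children) and Python index children[m-1].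
import Mathlib
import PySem

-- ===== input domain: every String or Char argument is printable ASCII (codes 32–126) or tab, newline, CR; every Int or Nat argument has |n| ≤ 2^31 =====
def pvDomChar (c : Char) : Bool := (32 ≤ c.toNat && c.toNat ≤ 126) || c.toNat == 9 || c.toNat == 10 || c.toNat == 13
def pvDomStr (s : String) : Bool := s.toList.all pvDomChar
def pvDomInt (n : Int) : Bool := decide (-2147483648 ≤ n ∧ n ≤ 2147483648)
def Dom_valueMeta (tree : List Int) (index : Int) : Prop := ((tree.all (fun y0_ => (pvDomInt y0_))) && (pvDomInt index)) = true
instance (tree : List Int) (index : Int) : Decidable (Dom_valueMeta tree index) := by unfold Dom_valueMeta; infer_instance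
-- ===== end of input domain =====

-- B re-implements A as a two-phase pass (parse the flat array into a rose tree, then evaluate it),
-- instead of A's single recursion that interleaves cursor movement with value computation;
-- objective: alternative decomposition, same asymptotic cost.

-- ===== PORT A =====
-- A's recursion is totalised with fuel = tree.length + 2 (a node needs ≥ 2 entries, so on any
-- input where the Python returns the recursion depth is < tree.length + 2); reads tree[i] are
-- PySem.List.pyGet? with a default of 0, only taken outside Pre_valueMeta.
-- the leaf 'for data in range(datas)' loop: state (index, value)
def aLeafMeta (tree : List Int) : Nat → Int → Int → Int × Int
  | 0, i, v => (i, v)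
  | k+1, i, v => aLeafMeta tree k (i+1) (v + (PySem.List.pyGet? tree i).getD 0)

-- the internal 'for data in range(datas)' loop: state (index, value)
def aIntMeta (tree : List Int) (nodes : List Int) : Nat → Int → Int → Int × Int
  | 0, i, v => (i, v)
  | k+1, i, v =>
    let m := (PySem.List.pyGet? tree i).getD 0
    aIntMeta tree nodes k (i+1)
      (if m ≤ (nodes.length : Int) then v + (PySem.List.pyGet? nodes (m-1)).getD 0 else v)

mutual
def valueMetaF (fuel : Nat) (tree : List Int) (index : Int) : Int × Int :=
  match fuel with
  | 0 => (index, 0)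
  | f+1 =>
    let n := (PySem.List.pyGet? tree index).getD 0
    let datas := (PySem.List.pyGet? tree (index+1)).getD 0
    let r := aChildren f tree (max n 0).toNat (index+2) []
    if r.2 = [] then aLeafMeta tree (max datas 0).toNat r.1 0
    else aIntMeta tree r.2 (max datas 0).toNat r.1 0
termination_by (fuel, 0)

-- the 'for node in range(len(nodes))' loop: state (index, nodes)
def aChildren (fuel : Nat) (tree : List Int) (k : Nat) (index : Int) (acc : List Int) : Int × List Int :=
  match k with
  | 0 => (index, acc)
  | k+1 =>
    let r := valueMetaF fuel tree index
    aChildren fuel tree k r.1 (acc ++ [r.2])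
termination_by (fuel, k+1)
end

def valueMeta (tree : List Int) (index : Int) : Int × Int :=
  valueMetaF (tree.length + 2) tree index

-- ===== PORT B =====
-- Source B's node (children, metas); children list as a mutual inductive (no nested inductive).
mutual
inductive PNode where
  | mk : PNodeL → List Int → PNode
inductive PNodeL where
  | nil : PNodeL
  | cons : PNode → PNodeL → PNodeL
end

-- Source B's metadata-collecting loop
def readMetasB (tree : List Int) (index : Int) : Nat → Int × List Int
  | 0 => (index, [])
  | k+1 =>
    let v := (PySem.List.pyGet? tree index).getD 0
    let r := readMetasB tree (index+1) k
    (r.1, v :: r.2)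

-- Source B's _parse, totalised with the same fuel discipline as PORT A
mutual
def parseB (fuel : Nat) (tree : List Int) (index : Int) : Int × PNode :=
  match fuel with
  | 0 => (index, .mk .nil [])
  | f+1 =>
    let nchild := (PySem.List.pyGet? tree index).getD 0
    let nmeta := (PySem.List.pyGet? tree (index+1)).getD 0
    let c := parseChildren f tree (max nchild 0).toNat (index+2)
    let m := readMetasB tree c.1 (max nmeta 0).toNat
    (m.1, .mk c.2 m.2)
termination_by (fuel, 0)

def parseChildren (fuel : Nat) (tree : List Int) (k : Nat) (index : Int) : Int × PNodeL :=
  match k with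
  | 0 => (index, .nil)
  | k+1 =>
    let r := parseB fuel tree index
    let s := parseChildren fuel tree k r.1
    (s.1, .cons r.2 s.2)
termination_by (fuel, k+1)
end

-- Source B's _value: structural evaluation of the parsed tree
mutual
def evalNode (nd : PNode) : Int :=
  match nd with
  | .mk cs metas =>
    match cs with
    | .nil => metas.foldl (fun a m => a + m) 0
    | .cons _ _ =>
      let vals := evalL cs
      metas.foldl
        (fun a m => if m ≤ (vals.length : Int) then a + (PySem.List.pyGet? vals (m-1)).getD 0 else a) 0
def evalL (l : PNodeL) : List Int :=
  match l with
  | .nil => []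
  | .cons h t => evalNode h :: evalL t
end

def valueMeta_alt (tree : List Int) (index : Int) : Int × Int :=
  let p := parseB (tree.length + 2) tree index
  (p.1, evalNode p.2)

-- ===== PRECONDITION & SPEC =====
-- Shape recognizer for Pre_: checks only that every read of the Python is in range (pyGet?
-- succeeds) and, for internal nodes, that every selecting metadata entry m with m ≤ #children
-- also satisfies 1-#children ≤ m (else nodes[m-1] is an IndexError); it computes no node values.
def okMetas (tree : List Int) (index : Int) (k : Nat) (p : Int → Bool) : Option Int :=
  match k with
  | 0 => some index
  | k+1 =>
    match PySem.List.pyGet? tree index with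
    | none => none
    | some m => if p m then okMetas tree (index+1) k p else none

-- 'k consecutive segments each spelled by step' — step is the node recognizer one fuel level down
def okSeq (step : Int → Option Int) : Nat → Int → Option Int
  | 0, i => some i
  | k+1, i =>
    match step i with
    | none => none
    | some j => okSeq step k j

def okNode (fuel : Nat) (tree : List Int) (index : Int) : Option Int :=
  match fuel with
  | 0 => none
  | f+1 =>
    match PySem.List.pyGet? tree index, PySem.List.pyGet? tree (index+1) with
    | some n, some datas =>
      let c := (max n 0).toNat
      match okSeq (okNode f tree) c (index+2) with
      | none => none
      | some i1 =>
        if c = 0 then okMetas tree i1 (max datas 0).toNat (fun _ => true)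
        else okMetas tree i1 (max datas 0).toNat (fun m => !(m ≤ (c : Int)) || (1 - (c : Int) ≤ m))
    | _, _ => none

-- Pre_ holds exactly on the inputs where Python A returns (elsewhere it raises IndexError).
def Pre_valueMeta (tree : List Int) (index : Int) : Prop :=
  (okNode (tree.length + 2) tree index).isSome = true
instance (tree : List Int) (index : Int) : Decidable (Pre_valueMeta tree index) := by
  unfold Pre_valueMeta; infer_instance

def pvWitness_valueMeta : List Int × Int := ([2, 2, 0, 1, 10, 0, 1, 20, 1, 2], 0)

def Spec_valueMeta (tree : List Int) (index : Int) (out : Int × Int) : Prop := out = valueMeta_alt tree index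
instance (tree : List Int) (index : Int) (out : Int × Int) : Decidable (Spec_valueMeta tree index out) := by unfold Spec_valueMeta; infer_instance

-- ===== CLAIM (what is proved, stated in full; the proofs are below) =====
def Claim_equal_valueMeta : Prop := ∀ (tree : List Int) (index : Int), Dom_valueMeta tree index → Pre_valueMeta tree index → Spec_valueMeta tree index (valueMeta tree index)

-- ===== LEMMAS AND PROOFS =====

theorem foldl_add_shift (δ : Int → Int) : ∀ (l : List Int) (a : Int),
    l.foldl (fun x y => x + δ y) a = a + l.foldl (fun x y => x + δ y) 0 := by
  intro l
  induction l with
  | nil => intro a; simp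
  | cons h t ih => intro a; simp only [List.foldl_cons]; rw [ih, ih (0 + δ h)]; ring

theorem aLeafMeta_eq (tree : List Int) : ∀ (k : Nat) (i v : Int),
    aLeafMeta tree k i v
      = ((readMetasB tree i k).1, v + (readMetasB tree i k).2.foldl (fun a m => a + m) 0) := by
  intro k
  induction k with
  | zero => intro i v; simp [aLeafMeta, readMetasB]
  | succ k ih =>
    intro i v
    simp only [aLeafMeta, readMetasB, List.foldl_cons]
    rw [ih, Prod.mk.injEq]
    refine ⟨rfl, ?_⟩
    rw [foldl_add_shift (fun y => y) _ (0 + (PySem.List.pyGet? tree i).getD 0)]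
    ring

theorem aIntMeta_eq (tree nodes : List Int) : ∀ (k : Nat) (i v : Int),
    aIntMeta tree nodes k i v
      = ((readMetasB tree i k).1,
         v + (readMetasB tree i k).2.foldl
           (fun a m => if m ≤ (nodes.length : Int) then a + (PySem.List.pyGet? nodes (m-1)).getD 0 else a) 0) := by
  have hshape : (fun (a m : Int) => if m ≤ (nodes.length : Int) then a + (PySem.List.pyGet? nodes (m-1)).getD 0 else a)
      = fun (a m : Int) => a + (if m ≤ (nodes.length : Int) then (PySem.List.pyGet? nodes (m-1)).getD 0 else 0) := by
    funext a m; split <;> simp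
  intro k
  induction k with
  | zero => intro i v; simp [aIntMeta, readMetasB]
  | succ k ih =>
    intro i v
    simp only [aIntMeta, readMetasB, List.foldl_cons]
    rw [ih, hshape, Prod.mk.injEq]
    refine ⟨rfl, ?_⟩
    rw [foldl_add_shift
      (fun m => if m ≤ ((nodes.length : Int)) then (PySem.List.pyGet? nodes (m-1)).getD 0 else 0)
      (readMetasB tree (i+1) k).2
      (if (PySem.List.pyGet? tree i).getD 0 ≤ (nodes.length : Int) then
        0 + (PySem.List.pyGet? nodes ((PySem.List.pyGet? tree i).getD 0 - 1)).getD 0 else 0)]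
    by_cases hc : (PySem.List.pyGet? tree i).getD 0 ≤ (nodes.length : Int)
    · simp only [if_pos hc]; ring
    · simp only [if_neg hc]; ring

theorem aChildren_eq (tree : List Int) (f : Nat)
    (hm : ∀ i, valueMetaF f tree i = ((parseB f tree i).1, evalNode (parseB f tree i).2)) :
    ∀ (k : Nat) (i : Int) (acc : List Int),
      aChildren f tree k i acc
        = ((parseChildren f tree k i).1, acc ++ evalL (parseChildren f tree k i).2) := by
  intro k
  induction k with
  | zero => intro i acc; simp [aChildren, parseChildren, evalL]
  | succ k ih =>
    intro i acc
    simp only [aChildren, parseChildren]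
    rw [hm i, ih]
    simp [evalL]

theorem main_eq (tree : List Int) : ∀ (f : Nat) (i : Int),
    valueMetaF f tree i = ((parseB f tree i).1, evalNode (parseB f tree i).2) := by
  intro f
  induction f with
  | zero => intro i; simp [valueMetaF, parseB, evalNode]
  | succ f ih =>
    intro i
    simp only [valueMetaF, parseB]
    rw [aChildren_eq tree f ih]
    cases hcs : (parseChildren f tree (max ((PySem.List.pyGet? tree i).getD 0) 0).toNat (i+2)).2 with
    | nil =>
      simp only [evalL, List.nil_append]
      rw [aLeafMeta_eq]
      simp [evalNode]
    | cons h t =>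
      simp only [evalL, List.nil_append]
      rw [if_neg (by simp)]
      rw [aIntMeta_eq]
      simp [evalNode, evalL]

-- ===== VERDICT (by name: the statement is the Claim_ definition above) =====
theorem valueMeta_spec : Claim_equal_valueMeta := by
  intro tree index _ _
  unfold Spec_valueMeta valueMeta valueMeta_alt
  exact main_eq tree (tree.length + 2) index
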